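-- pv_equiv track=rewrite | github.com/NeelmaniRam/HackerRank | Hackerrank Fest 2020/CyclicBinaryString.py | maximumPower
-- ===== SOURCE A (Python) =====
-- def maximumPower(s):
--     # Write your code here
--     n = len(s)
--     count,maxcount,zerocount= 0,0,0
--     for i in range(n):
--         if s[i]=='0':
--             count+=1
--             zerocount+=1
--         else:
--             maxcount = max(maxcount,count)
--             count=0
--
--     maxcount = max(maxcount,count)
--     if (zerocount==n):
--         return -1
--
--     k = 0
--     l = n-1
--     firstcount,lastcount=0,0
--
--     while(s[k]=='0'):
--         firstcount+=1
--         k+=1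
--     while(s[l]=='0'):
--         lastcount+=1
--         l-=1
--
--     maxcount = max(maxcount, firstcount+lastcount)
--
--     return maxcount
-- ===== SOURCE B (Python) =====
-- def maximumPower(s):
--     # gap-based: record the indices of non-'0' characters; the answer is the
--     # largest cyclic gap between consecutive such indices (-1 if there are none)
--     n = len(s)
--     ones = [i for i, c in enumerate(s) if c != '0']
--     if not ones:
--         return -1
--     best = ones[0] + (n - 1 - ones[-1])
--     for a, b in zip(ones, ones[1:]):
--         best = max(best, b - a - 1)
--     return best
-- ===== Notes on version B (the rewrite author's own statement) =====
-- stated objective: alternative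
-- what changed: Instead of counting zero-run lengths in a scan plus two boundary while-loops, B collects the indices of the non-'0' characters and returns the largest cyclic gap between consecutive such indices (-1 if there are none).
import Mathlib
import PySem

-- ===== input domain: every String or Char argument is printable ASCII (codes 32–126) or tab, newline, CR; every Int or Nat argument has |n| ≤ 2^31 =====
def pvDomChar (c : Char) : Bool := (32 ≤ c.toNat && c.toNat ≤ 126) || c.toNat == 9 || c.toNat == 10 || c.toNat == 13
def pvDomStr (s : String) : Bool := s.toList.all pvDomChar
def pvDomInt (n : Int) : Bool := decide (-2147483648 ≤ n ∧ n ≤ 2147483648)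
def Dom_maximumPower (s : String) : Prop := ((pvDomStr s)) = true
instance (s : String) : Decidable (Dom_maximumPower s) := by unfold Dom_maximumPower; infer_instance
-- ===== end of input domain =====

-- B replaces A's zero-run counting scan and two boundary while-loops by collecting the
-- indices of non-'0' characters and taking the largest cyclic gap between consecutive
-- indices (objective: alternative algorithm, same cost).


-- ===== PORT A =====
-- the for-loop over range(n): state (count, maxcount, zerocount)
def mpStep (st : Nat × Nat × Nat) (c : Char) : Nat × Nat × Nat :=
  if c = '0' then (st.1 + 1, st.2.1, st.2.2 + 1)
  else (0, Nat.max st.2.1 st.1, st.2.2)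

-- the 'while s[k] == 0' loop (count of leading '0's; the Python loops only run
-- when a non-'0' exists, so the [] case is unreachable there)
def mpLeadZeros : List Char → Nat
  | [] => 0
  | c :: rest => if c = '0' then 1 + mpLeadZeros rest else 0

def maximumPower (s : String) : Int :=
  let l := s.toList
  let n := l.length
  let st := l.foldl mpStep (0, 0, 0)
  let maxcount := Nat.max st.2.1 st.1
  if st.2.2 = n then -1
  else
    let firstcount := mpLeadZeros l            -- forward while-loop
    let lastcount := mpLeadZeros l.reverse     -- backward while-loop = forward on the reverse
    Int.ofNat (Nat.max maxcount (firstcount + lastcount))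

-- ===== PORT B =====
-- the comprehension [i for i, c in enumerate(s) if c != '0']
def mpOnes : List Char → Nat → List Nat
  | [], _ => []
  | c :: rest, i => if c = '0' then mpOnes rest (i + 1) else i :: mpOnes rest (i + 1)

def maximumPower_alt (s : String) : Int :=
  let l := s.toList
  let n := l.length
  let ones := mpOnes l 0
  match ones with
  | [] => -1
  | o :: _ =>
    let best := o + (n - 1 - ones.getLastD 0)
    Int.ofNat ((ones.zip ones.tail).foldl (fun b p => Nat.max b (p.2 - p.1 - 1)) best)

-- ===== PRECONDITION & SPEC =====
def Spec_maximumPower (s : String) (out : Int) : Prop := out = maximumPower_alt s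
instance (s : String) (out : Int) : Decidable (Spec_maximumPower s out) := by unfold Spec_maximumPower; infer_instance

-- ===== CLAIM (what is proved, stated in full; the proofs are below) =====
def Claim_equal_maximumPower : Prop := ∀ (s : String), Dom_maximumPower s → Spec_maximumPower s (maximumPower s)

-- ===== LEMMAS AND PROOFS =====

-- run-length view: lengths of the maximal zero-runs of l
def mpLens (l : List Char) : List Nat :=
  ((l.map (fun c => if c = '0' then '0' else '1')).splitOn '1').map List.length

-- run lengths reconstructed from the positions of the ones
def lensOf (n : Nat) : Nat → List Nat → List Nat
  | i, [] => [n - i]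
  | i, o :: os => (o - i) :: lensOf n (o + 1) os

-- gaps between consecutive one-positions
def mpGaps : List Nat → List Nat
  | a :: b :: rest => (b - a - 1) :: mpGaps (b :: rest)
  | _ => []

theorem mpLens_ne_nil (l : List Char) : mpLens l ≠ [] := by
  simp only [mpLens, List.splitOn, ne_eq, List.map_eq_nil_iff]
  exact List.splitOnP_ne_nil _ _

theorem mpLens_nil : mpLens [] = [0] := by decide

theorem mpLens_cons_zero (rest : List Char) :
    mpLens ('0' :: rest) = (mpLens rest).modifyHead (· + 1) := by
  simp only [mpLens, List.splitOn, List.map_cons, List.splitOnP_cons]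
  norm_num
  cases h : (rest.map (fun c => if c = '0' then '0' else '1')).splitOnP (· == '1') with
  | nil => simp
  | cons a t => simp

theorem mpLens_cons_one (c : Char) (h : c ≠ '0') (rest : List Char) :
    mpLens (c :: rest) = 0 :: mpLens rest := by
  simp only [mpLens, List.splitOn, List.map_cons, if_neg h, List.splitOnP_cons]
  norm_num

theorem modifyHead_zero_add (L : List Nat) : L.modifyHead (fun a => 0 + a) = L := by
  cases L <;> simp

theorem getLastD_irrel {α : Type} (L : List α) (h : L ≠ []) (a b : α) :
    L.getLastD a = L.getLastD b := by
  cases L with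
  | nil => exact absurd rfl h
  | cons x t =>
    cases hgl : (x :: t).getLast? with
    | none => simp at hgl
    | some y => simp [List.getLastD]

theorem foldl_max_cons (a : Nat) (X : List Nat) :
    (a :: X).foldl Nat.max 0 = Nat.max a (X.foldl Nat.max 0) := by
  have : (a :: X).foldl Nat.max 0 = X.foldl Nat.max (Nat.max 0 a) := rfl
  have h1 : Nat.max 0 a = Nat.max a 0 := Nat.max_comm 0 a
  rw [this, h1]
  exact List.foldl_assoc

theorem nat_zero_max (a : Nat) : Nat.max 0 a = a := by
  simp

theorem foldl_max_init (X : List Nat) : ∀ a : Nat,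
    X.foldl Nat.max a = Nat.max a (X.foldl Nat.max 0) := by
  induction X with
  | nil => intro a; simp
  | cons x t ih =>
    intro a
    rw [List.foldl_cons, ih, foldl_max_cons]
    exact Nat.max_assoc _ _ _

-- the main fold invariant: A's loop state in terms of the run lengths
theorem mp_fold (l : List Char) : ∀ cnt mx z : Nat,
    l.foldl mpStep (cnt, mx, z) =
      (((mpLens l).modifyHead (cnt + ·)).getLastD 0,
       Nat.max mx ((((mpLens l).modifyHead (cnt + ·)).dropLast).foldl Nat.max 0),
       z + l.countP (· = '0')) := by
  induction l with
  | nil => intro cnt mx z; simp [mpLens_nil]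
  | cons c rest ih =>
    intro cnt mx z
    by_cases hc : c = '0'
    · subst hc
      rw [List.foldl_cons]
      have hstep : mpStep (cnt, mx, z) '0' = (cnt + 1, mx, z + 1) := by simp [mpStep]
      rw [hstep, ih, mpLens_cons_zero, List.modifyHead_modifyHead]
      have hfun : ((fun a => cnt + a) ∘ (· + 1)) = (fun a => (cnt + 1) + a) := by
        funext a; simp; omega
      rw [hfun]
      simp
      omega
    · rw [List.foldl_cons]
      have hstep : mpStep (cnt, mx, z) c = (0, Nat.max mx cnt, z) := by simp [mpStep, hc]
      rw [hstep, ih, mpLens_cons_one c hc, modifyHead_zero_add]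
      have hne := mpLens_ne_nil rest
      have hmod : (0 :: mpLens rest).modifyHead (cnt + ·) = cnt :: mpLens rest := by simp
      rw [hmod]
      refine Prod.ext ?_ (Prod.ext ?_ ?_)
      · simp only
        cases hL : mpLens rest with
        | nil => exact absurd hL hne
        | cons x t => simp
      · simp only
        rw [List.dropLast_cons_of_ne_nil hne, foldl_max_cons]
        exact Nat.max_assoc _ _ _
      · simp [hc]

theorem mp_head (l : List Char) : mpLeadZeros l = (mpLens l).headD 0 := by
  induction l with
  | nil => simp [mpLeadZeros, mpLens_nil]
  | cons c rest ih =>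
    by_cases hc : c = '0'
    · subst hc
      rw [mpLens_cons_zero]
      cases hL : mpLens rest with
      | nil => exact absurd hL (mpLens_ne_nil rest)
      | cons x t => simp [mpLeadZeros, ih, hL]; omega
    · rw [mpLens_cons_one c hc]; simp [mpLeadZeros, hc]

-- the fold's final count is the trailing zero run (when not everything is '0')
theorem mp_count_trailing (l : List Char) : ∀ st : Nat × Nat × Nat,
    (l.foldl mpStep st).1 =
      if l.all (· = '0') then st.1 + l.length else mpLeadZeros l.reverse := by
  induction l using List.reverseRecOn with
  | nil => intro st; simp
  | append_singleton l c ih =>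
    intro st
    rw [List.foldl_append]
    by_cases hc : c = '0'
    · subst hc
      have hstep : ∀ t : Nat × Nat × Nat, (mpStep t '0').1 = t.1 + 1 := by
        intro t; simp [mpStep]
      simp only [List.foldl_cons, List.foldl_nil, hstep, ih st]
      by_cases hall : l.all (· = '0')
      · have hall2 : ((l ++ ['0']).all (· = '0')) = true := by simp [List.all_append, hall]
        rw [if_pos hall, if_pos hall2, List.length_append]
        simp; omega
      · have hall2 : ¬ (((l ++ ['0']).all (· = '0')) = true) := by
          simp only [List.all_append, Bool.and_eq_true]
          exact fun h => hall h.1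
        rw [if_neg hall, if_neg hall2, List.reverse_append]
        simp [mpLeadZeros]
        omega
    · have hstep : (mpStep (l.foldl mpStep st) c).1 = 0 := by simp [mpStep, hc]
      simp only [List.foldl_cons, List.foldl_nil, hstep]
      have hall2 : ¬ ((l ++ [c]).all (· = '0')) = true := by simp [List.all_append, hc]
      rw [if_neg hall2, List.reverse_append]
      simp [mpLeadZeros, hc]

theorem all_iff_countP (l : List Char) :
    l.all (· = '0') = true ↔ l.countP (· = '0') = l.length := by
  simp [List.all_eq_true, List.countP_eq_length]

-- ===== B-side lemmas =====

theorem mpOnes_ge (l : List Char) : ∀ i x, x ∈ mpOnes l i → i ≤ x := by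
  induction l with
  | nil => intro i x h; simp [mpOnes] at h
  | cons c rest ih =>
    intro i x h
    by_cases hc : c = '0'
    · simp only [mpOnes, if_pos hc] at h
      have := ih (i + 1) x h; omega
    · simp only [mpOnes, if_neg hc, List.mem_cons] at h
      rcases h with h | h
      · omega
      · have := ih (i + 1) x h; omega

theorem modifyHead_lensOf (n i : Nat) (os : List Nat) (h1 : i + 1 ≤ n)
    (h2 : ∀ x ∈ os, i + 1 ≤ x) :
    (lensOf n (i + 1) os).modifyHead (· + 1) = lensOf n i os := by
  cases os with
  | nil => simp only [lensOf, List.modifyHead]; congr 1; omega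
  | cons o t =>
    have ho : i + 1 ≤ o := h2 o (by simp)
    simp only [lensOf, List.modifyHead]
    congr 1; omega

theorem mpLens_eq_lensOf (l : List Char) : ∀ i n, n = i + l.length →
    mpLens l = lensOf n i (mpOnes l i) := by
  induction l with
  | nil =>
    intro i n hn
    simp only [mpOnes, lensOf, mpLens_nil]
    have : n - i = 0 := by simp at hn; omega
    rw [this]
  | cons c rest ih =>
    intro i n hn
    by_cases hc : c = '0'
    · subst hc
      simp only [mpOnes]
      rw [mpLens_cons_zero, ih (i + 1) n (by simp at hn ⊢; omega)]
      exact modifyHead_lensOf n i _ (by simp at hn; omega) (mpOnes_ge rest (i + 1))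
    · simp only [mpOnes, if_neg hc]
      rw [mpLens_cons_one c hc, ih (i + 1) n (by simp at hn ⊢; omega)]
      simp [lensOf]

theorem mp_max_split (L : List Nat) (h : L ≠ []) :
    Nat.max (L.dropLast.foldl Nat.max 0) (L.getLastD 0) = L.foldl Nat.max 0 := by
  induction L with
  | nil => exact absurd rfl h
  | cons a t ih =>
    cases t with
    | nil => simp
    | cons b u =>
      rw [List.dropLast_cons_of_ne_nil (by simp), foldl_max_cons, foldl_max_cons,
        List.getLastD_cons]
      rw [← ih (by simp)]
      have : (b :: u).getLastD a = (b :: u).getLastD 0 := getLastD_irrel _ (by simp) a 0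
      rw [this]; exact Nat.max_assoc _ _ _

theorem lensOf_shape (n : Nat) : ∀ os i o,
    lensOf n i (o :: os) = (o - i) :: (mpGaps (o :: os) ++ [n - 1 - (o :: os).getLastD 0]) := by
  intro os
  induction os with
  | nil =>
    intro i o
    have h1 : ([o] : List Nat).getLastD 0 = o := rfl
    simp only [lensOf, mpGaps, List.nil_append, h1]
    congr 2
    omega
  | cons o' t ih =>
    intro i o
    have hstep : lensOf n i (o :: o' :: t) = (o - i) :: lensOf n (o + 1) (o' :: t) := rfl
    rw [hstep, ih (o + 1) o']
    have hgl : (o :: o' :: t).getLastD 0 = (o' :: t).getLastD 0 := by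
      rw [List.getLastD_cons]
      exact getLastD_irrel _ (by simp) o 0
    rw [hgl]
    have hgap : mpGaps (o :: o' :: t) = (o' - o - 1) :: mpGaps (o' :: t) := rfl
    rw [hgap]
    have hsub : o' - (o + 1) = o' - o - 1 := by omega
    rw [hsub]
    simp

theorem zip_fold_gaps (os : List Nat) : ∀ init : Nat,
    (os.zip os.tail).foldl (fun b p => Nat.max b (p.2 - p.1 - 1)) init
      = (mpGaps os).foldl Nat.max init := by
  induction os with
  | nil => intro init; simp [mpGaps]
  | cons a t ih =>
    cases t with
    | nil => intro init; simp [mpGaps]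
    | cons b u =>
      intro init
      simp only [List.tail_cons, List.zip_cons_cons, List.foldl_cons, mpGaps]
      exact ih (Nat.max init (b - a - 1))

theorem mpOnes_nil_iff (l : List Char) : ∀ i,
    mpOnes l i = [] ↔ l.countP (· = '0') = l.length := by
  induction l with
  | nil => intro i; simp [mpOnes]
  | cons c rest ih =>
    intro i
    by_cases hc : c = '0'
    · subst hc
      rw [show mpOnes ('0' :: rest) i = mpOnes rest (i + 1) from by simp [mpOnes]]
      rw [ih (i + 1)]
      simp only [List.countP_cons, List.length_cons]
      simp
    · simp only [mpOnes, if_neg hc, List.countP_cons, List.length_cons]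
      have h1 := List.countP_le_length (p := fun x => decide (x = '0')) (l := rest)
      have h3 : (decide (c = '0')) = false := by simp [hc]
      simp [h3]
      omega

-- ===== VERDICT (by name: the statement is the Claim_ definition above) =====
theorem maximumPower_spec : Claim_equal_maximumPower := by
  intro s _
  unfold Spec_maximumPower maximumPower maximumPower_alt
  set l := s.toList with hl
  simp only
  rw [mp_fold l 0 0 0, modifyHead_zero_add]
  dsimp only
  have hlens := mpLens_eq_lensOf l 0 l.length (by simp)
  cases hones : mpOnes l 0 with
  | nil =>
    have hz : l.countP (· = '0') = l.length := (mpOnes_nil_iff l 0).1 hones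
    rw [if_pos (by simpa using hz)]
  | cons o os =>
    have hz : l.countP (· = '0') ≠ l.length := fun h => by
      rw [(mpOnes_nil_iff l 0).2 h] at hones; exact List.cons_ne_nil o os hones.symm
    rw [if_neg (by simpa using hz)]
    have hall : ¬ ((l.all (· = '0')) = true) := fun h => hz ((all_iff_countP l).1 h)
    have htrail : (mpLens l).getLastD 0 = mpLeadZeros l.reverse := by
      have h1 := mp_count_trailing l (0, 0, 0)
      rw [mp_fold l 0 0 0, modifyHead_zero_add, if_neg hall] at h1
      exact h1
    rw [hones, lensOf_shape l.length os 0 o, Nat.sub_zero] at hlens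
    have hhead : (mpLens l).headD 0 = o := by rw [hlens]; rfl
    have hlast : (mpLens l).getLastD 0
        = l.length - 1 - (o :: os).getLastD 0 := by
      rw [hlens, show o :: (mpGaps (o :: os) ++ [l.length - 1 - (o :: os).getLastD 0])
            = (o :: mpGaps (o :: os)) ++ [l.length - 1 - (o :: os).getLastD 0] by simp,
          List.getLastD_concat]
    have hfull : (mpLens l).foldl Nat.max 0
        = Nat.max (Nat.max o ((mpGaps (o :: os)).foldl Nat.max 0))
            (l.length - 1 - (o :: os).getLastD 0) := by
      rw [hlens, show o :: (mpGaps (o :: os) ++ [l.length - 1 - (o :: os).getLastD 0])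
            = (o :: mpGaps (o :: os)) ++ [l.length - 1 - (o :: os).getLastD 0] by simp,
          List.foldl_append]
      simp only [List.foldl_cons, List.foldl_nil]
      rw [foldl_max_init (mpGaps (o :: os)) (Nat.max 0 o), nat_zero_max]
    rw [mp_head l, ← htrail]
    dsimp only
    rw [zip_fold_gaps,
        foldl_max_init (mpGaps (o :: os)) (o + (l.length - 1 - (o :: os).getLastD 0)),
        nat_zero_max (List.foldl Nat.max 0 (mpLens l).dropLast),
        mp_max_split (mpLens l) (mpLens_ne_nil l), hfull, hhead, hlast]
    congr 1
    simp only [Nat.max_def]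
    split_ifs <;> omega
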